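-- pv_equiv track=rewrite | github.com/gdsec-test/splunk-sra-vuln-play | bin/src/app.py | construct_serial_map
-- ===== SOURCE A (Python) =====
-- VULN_PLAY_FIELD_NAME = "Vuln_Play_Name"
--
-- SERIAL_FIELD_NAME = "Serial"
--
-- SERVICE_TEAM_FIELD_NAME = "Svc_Team"
--
-- def construct_serial_map(header_map, results):
--     serial_idx = header_map[SERIAL_FIELD_NAME]
--     vuln_play_idx = header_map[VULN_PLAY_FIELD_NAME]
--     service_team_idx = header_map[SERVICE_TEAM_FIELD_NAME]
--
--     ci_map = {}
--     for result in results: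
--         serial_number = result[serial_idx]
--         vuln_play = result[vuln_play_idx]
--         service_team = result[service_team_idx]
--
--         upsert_result_into_ci_map(
--             ci_map, serial_number, vuln_play, service_team)
--
--     return ci_map
--
-- def upsert_result_into_ci_map(ci_map, serial_number, vuln_play, service_team):
--     team_vulns = ci_map.get(service_team)
--     if team_vulns is not None:
--         ci_arr = team_vulns.get(vuln_play)
--         if ci_arr is None:
--             team_vulns[vuln_play] = [serial_number]
--         else:
--             ci_arr.append(serial_number)
--     else:
--         ci_map[service_team] = {vuln_play: [serial_number]}
-- ===== SOURCE B (Python) =====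
-- VULN_PLAY_FIELD_NAME = "Vuln_Play_Name"
-- SERIAL_FIELD_NAME = "Serial"
-- SERVICE_TEAM_FIELD_NAME = "Svc_Team"
--
-- def construct_serial_map(header_map, results):
--     serial_idx = header_map[SERIAL_FIELD_NAME]
--     vuln_play_idx = header_map[VULN_PLAY_FIELD_NAME]
--     service_team_idx = header_map[SERVICE_TEAM_FIELD_NAME]
--
--     triples = [(r[service_team_idx], r[vuln_play_idx], r[serial_idx]) for r in results]
--     return {
--         team: {
--             play: [s for t, p, s in triples if t == team and p == play]
--             for play in dict.fromkeys(p for t, p, _ in triples if t == team)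
--         }
--         for team in dict.fromkeys(t for t, _, _ in triples)
--     }
-- ===== Notes on version B (the rewrite author's own statement) =====
-- stated objective: alternative
-- what changed: Replaces the incremental upsert-into-nested-dicts loop by a declarative group-by: extract all (team, play, serial) triples once, then build the whole nested map with dict/list comprehensions over the first-occurrence-deduplicated team and play keys, selecting each serial list by filtering the triples.
import Mathlib
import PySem

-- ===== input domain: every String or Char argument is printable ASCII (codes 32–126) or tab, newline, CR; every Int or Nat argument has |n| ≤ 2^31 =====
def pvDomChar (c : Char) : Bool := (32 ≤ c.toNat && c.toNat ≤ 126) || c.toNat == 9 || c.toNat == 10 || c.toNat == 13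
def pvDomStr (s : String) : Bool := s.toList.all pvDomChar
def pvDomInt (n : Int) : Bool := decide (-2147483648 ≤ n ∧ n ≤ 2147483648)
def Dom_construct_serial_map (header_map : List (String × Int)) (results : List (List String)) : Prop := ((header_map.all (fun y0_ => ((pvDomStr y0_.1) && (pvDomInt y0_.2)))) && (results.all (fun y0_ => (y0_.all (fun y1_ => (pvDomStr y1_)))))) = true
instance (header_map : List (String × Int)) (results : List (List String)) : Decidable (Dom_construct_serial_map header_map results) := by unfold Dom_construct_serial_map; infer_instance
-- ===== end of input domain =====

-- B replaces A's incremental upsert loop by a declarative group-by over extracted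
-- (team, play, serial) triples (alternative decomposition, not claimed faster).


-- ===== PORT A =====
def upsert_result_into_ci_map (ci_map : PySem.Dict String (PySem.Dict String (List String)))
    (serial_number vuln_play service_team : String) :
    PySem.Dict String (PySem.Dict String (List String)) :=
  match ci_map.get? service_team with
  | some team_vulns =>
    match team_vulns.get? vuln_play with
    | none => ci_map.insert service_team (team_vulns.insert vuln_play [serial_number])
    | some ci_arr => ci_map.insert service_team (team_vulns.insert vuln_play (ci_arr ++ [serial_number]))
  | none => ci_map.insert service_team (PySem.Dict.mk [(vuln_play, [serial_number])])

def construct_serial_map (header_map : List (String × Int)) (results : List (List String)) :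
    List (String × List (String × List String)) :=
  match (PySem.Dict.mk header_map).get? "Serial", (PySem.Dict.mk header_map).get? "Vuln_Play_Name",
        (PySem.Dict.mk header_map).get? "Svc_Team" with
  | some serial_idx, some vuln_play_idx, some service_team_idx =>
    (results.foldl (fun ci_map result =>
      match PySem.List.pyGet? result serial_idx, PySem.List.pyGet? result vuln_play_idx,
            PySem.List.pyGet? result service_team_idx with
      | some serial_number, some vuln_play, some service_team =>
          upsert_result_into_ci_map ci_map serial_number vuln_play service_team
      | _, _, _ => ci_map) (PySem.Dict.mk [])).items.map (fun p => (p.1, p.2.items))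
  | _, _, _ => []

-- ===== PORT B =====
def construct_serial_map_alt (header_map : List (String × Int)) (results : List (List String)) :
    List (String × List (String × List String)) :=
  match (PySem.Dict.mk header_map).get? "Serial" with
  | none => []
  | some serial_idx =>
    match (PySem.Dict.mk header_map).get? "Vuln_Play_Name" with
    | none => []
    | some vuln_play_idx =>
      match (PySem.Dict.mk header_map).get? "Svc_Team" with
      | none => []
      | some service_team_idx =>
        let triples := results.filterMap (fun r =>
          (PySem.List.pyGet? r service_team_idx).bind (fun t =>
            (PySem.List.pyGet? r vuln_play_idx).bind (fun p =>
              (PySem.List.pyGet? r serial_idx).map (fun s => (t, p, s)))))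
        (PySem.List.dedup (triples.map (fun x => x.1))).map (fun team =>
          (team, (PySem.List.dedup ((triples.filter (fun x => x.1 == team)).map (fun x => x.2.1))).map
            (fun play => (play, (triples.filter (fun x => x.1 == team && x.2.1 == play)).map (fun x => x.2.2)))))

-- ===== PRECONDITION & SPEC =====
-- Pre_ excludes exactly the inputs where the Python A raises: a header_map missing one of the
-- three field names (KeyError) or a result row where one of the three indices is out of range (IndexError).
def Pre_construct_serial_map (header_map : List (String × Int)) (results : List (List String)) : Prop :=
  (((PySem.Dict.mk header_map).get? "Serial").elim false (fun serial_idx =>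
    ((PySem.Dict.mk header_map).get? "Vuln_Play_Name").elim false (fun vuln_play_idx =>
      ((PySem.Dict.mk header_map).get? "Svc_Team").elim false (fun service_team_idx =>
        results.all (fun r =>
          decide (PySem.Raise.InRange r.length serial_idx) &&
          decide (PySem.Raise.InRange r.length vuln_play_idx) &&
          decide (PySem.Raise.InRange r.length service_team_idx)))))) = true
instance (header_map : List (String × Int)) (results : List (List String)) : Decidable (Pre_construct_serial_map header_map results) := by unfold Pre_construct_serial_map; infer_instance

def pvWitness_construct_serial_map : (List (String × Int)) × List (List String) :=
  ([("Serial", 0), ("Vuln_Play_Name", 1), ("Svc_Team", 2)],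
   [["s1", "p1", "t1"], ["s2", "p1", "t1"], ["s3", "p2", "t1"], ["s4", "p1", "t2"]])

def Spec_construct_serial_map (header_map : List (String × Int)) (results : List (List String)) (out : List (String × List (String × List String))) : Prop := out = construct_serial_map_alt header_map results
instance (header_map : List (String × Int)) (results : List (List String)) (out : List (String × List (String × List String))) : Decidable (Spec_construct_serial_map header_map results out) := by unfold Spec_construct_serial_map; infer_instance

-- ===== CLAIM (what is proved, stated in full; the proofs are below) =====
def Claim_equal_construct_serial_map : Prop := ∀ (header_map : List (String × Int)) (results : List (List String)), Dom_construct_serial_map header_map results → Pre_construct_serial_map header_map results → Spec_construct_serial_map header_map results (construct_serial_map header_map results)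

-- ===== LEMMAS AND PROOFS =====

def serialsOf (l : List (String × String × String)) (team play : String) : List String :=
  (l.filter (fun x => x.1 == team && x.2.1 == play)).map (fun x => x.2.2)

def playsOf (l : List (String × String × String)) (team : String) : List String :=
  PySem.List.dedup ((l.filter (fun x => x.1 == team)).map (fun x => x.2.1))

def innerG (l : List (String × String × String)) (team : String) : List (String × List String) :=
  (playsOf l team).map (fun play => (play, serialsOf l team play))

def groupG (l : List (String × String × String)) : List (String × List (String × List String)) :=
  (PySem.List.dedup (l.map (fun x => x.1))).map (fun team => (team, innerG l team))

def innerD (l : List (String × String × String)) (team : String) : PySem.Dict String (List String) :=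
  PySem.Dict.mk (innerG l team)

def groupD (l : List (String × String × String)) : PySem.Dict String (PySem.Dict String (List String)) :=
  PySem.Dict.mk ((PySem.List.dedup (l.map (fun x => x.1))).map (fun team => (team, innerD l team)))

def stepT (d : PySem.Dict String (PySem.Dict String (List String))) (x : String × String × String) :
    PySem.Dict String (PySem.Dict String (List String)) :=
  upsert_result_into_ci_map d x.2.2 x.2.1 x.1

lemma ofList_append_singleton {α : Type} [BEq α] [LawfulBEq α] (m : List α) (a : α) :
    PySem.Set.ofList (m ++ [a]) =
      if a ∈ PySem.Set.ofList m then PySem.Set.ofList m else PySem.Set.ofList m ++ [a] := by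
  simp only [PySem.Set.ofList_eq_foldl, List.foldl_append, List.foldl_cons,
    List.foldl_nil, PySem.Set.add, PySem.Set.contains, List.contains_iff_mem]

lemma get?_mk_map {ν : Type} (ks : List String) (g : String → ν) (t : String) :
    (PySem.Dict.mk (ks.map (fun k => (k, g k)))).get? t =
      if t ∈ ks then some (g t) else none := by
  induction ks with
  | nil => simp [PySem.Dict.get?]
  | cons k ks ih =>
    simp only [List.map_cons, PySem.Dict.get?_mk_cons, ih, List.mem_cons]
    by_cases h : k = t
    · subst h; simp
    · simp [h, Ne.symm h, beq_iff_eq]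

lemma insert_mk_map {ν : Type} (ks : List String) (g : String → ν) (t : String) (v : ν) :
    (PySem.Dict.mk (ks.map (fun k => (k, g k)))).insert t v =
      PySem.Dict.mk (if t ∈ ks then ks.map (fun k => (k, if k = t then v else g k))
                     else ks.map (fun k => (k, g k)) ++ [(t, v)]) := by
  simp only [PySem.Dict.insert, PySem.Dict.contains, List.any_map, Function.comp_def]
  by_cases h : t ∈ ks
  · have ha : (ks.any fun k => k == t) = true := List.any_eq_true.2 ⟨t, h, by simp⟩
    simp only [ha, if_pos, h, List.map_map, Function.comp_def]
    congr 1
    refine List.map_congr_left (fun k _ => ?_)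
    by_cases hk : k = t <;> simp [hk]
  · have ha : (ks.any fun k => k == t) = false := by
      simp only [List.any_eq_false, beq_iff_eq]
      intro k hk he; exact h (he ▸ hk)
    simp [ha, h]

lemma serialsOf_append (l : List (String × String × String)) (t p s team play : String) :
    serialsOf (l ++ [(t, p, s)]) team play =
      serialsOf l team play ++ (if t = team ∧ p = play then [s] else []) := by
  simp only [serialsOf, List.filter_append, List.map_append]
  by_cases h1 : t = team <;> by_cases h2 : p = play <;> simp [h1, h2]

lemma playsOf_append (l : List (String × String × String)) (t p s team : String) :
    playsOf (l ++ [(t, p, s)]) team =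
      if t = team then
        (if p ∈ playsOf l team then playsOf l team else playsOf l team ++ [p])
      else playsOf l team := by
  simp only [playsOf, List.filter_append]
  by_cases h : t = team
  · simp [h, List.map_append, ofList_append_singleton]
  · simp [h]

lemma serialsOf_of_not_mem_plays (l : List (String × String × String)) (team p : String)
    (h : p ∉ playsOf l team) : serialsOf l team p = [] := by
  simp only [playsOf, PySem.List.mem_dedup, List.mem_map, List.mem_filter] at h
  push Not at h
  simp only [serialsOf, List.map_eq_nil_iff, List.filter_eq_nil_iff]
  intro y hy
  simp only [Bool.and_eq_true, beq_iff_eq, not_and]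
  intro h1 h2
  exact absurd (h y ⟨hy, by simp [h1]⟩) (by simp [h2])

lemma filter_of_not_mem_teams (l : List (String × String × String)) (team : String)
    (h : team ∉ l.map (fun x => x.1)) : l.filter (fun x => x.1 == team) = [] := by
  rw [List.filter_eq_nil_iff]
  intro y hy
  simp only [beq_iff_eq]
  intro h1
  exact h (List.mem_map.2 ⟨y, hy, h1⟩)

lemma innerG_append_ne (l : List (String × String × String)) (t p s team : String) (h : t ≠ team) :
    innerG (l ++ [(t, p, s)]) team = innerG l team := by
  simp only [innerG, playsOf_append, h, if_false]
  refine List.map_congr_left (fun play _ => ?_)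
  simp [serialsOf_append, h]

lemma innerG_append_self_mem (l : List (String × String × String)) (t p s : String)
    (hp : p ∈ playsOf l t) :
    innerG (l ++ [(t, p, s)]) t =
      (playsOf l t).map (fun play =>
        (play, if play = p then serialsOf l t p ++ [s] else serialsOf l t play)) := by
  simp only [innerG, playsOf_append, if_pos, hp]
  refine List.map_congr_left (fun play _ => ?_)
  by_cases hpp : play = p
  · subst hpp; simp [serialsOf_append]
  · have hpp' : ¬p = play := fun h => hpp h.symm
    simp [serialsOf_append, hpp, hpp']

lemma innerG_append_self_not_mem (l : List (String × String × String)) (t p s : String)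
    (hp : p ∉ playsOf l t) :
    innerG (l ++ [(t, p, s)]) t = innerG l t ++ [(p, [s])] := by
  simp only [innerG, playsOf_append, if_true, hp, if_false, List.map_append, List.map_cons,
    List.map_nil]
  congr 1
  · refine List.map_congr_left (fun play hplay => ?_)
    have hne : ¬p = play := fun h => hp (h ▸ hplay)
    simp [serialsOf_append, hne]
  · simp [serialsOf_append, serialsOf_of_not_mem_plays l t p hp]

lemma teams_append (l : List (String × String × String)) (t p s : String) :
    PySem.List.dedup ((l ++ [(t, p, s)]).map (fun x => x.1)) =
      if t ∈ PySem.List.dedup (l.map (fun x => x.1)) then PySem.List.dedup (l.map (fun x => x.1))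
      else PySem.List.dedup (l.map (fun x => x.1)) ++ [t] := by
  simp only [List.map_append, List.map_cons, List.map_nil, PySem.List.dedup]
  exact ofList_append_singleton _ t

lemma innerD_append_nil_teams (l : List (String × String × String)) (t p s : String)
    (ht : t ∉ l.map (fun x => x.1)) :
    innerD (l ++ [(t, p, s)]) t = PySem.Dict.mk [(p, [s])] := by
  have hf : l.filter (fun x => x.1 == t) = [] := filter_of_not_mem_teams l t ht
  have hpl : playsOf l t = [] := by simp [playsOf, hf, PySem.List.dedup, PySem.Set.ofList]
  have hinner := innerG_append_self_not_mem l t p s (by simp [hpl])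
  unfold innerD
  rw [hinner]
  simp [innerG, hpl]

lemma step_groupD (l : List (String × String × String)) (x : String × String × String) :
    stepT (groupD l) x = groupD (l ++ [x]) := by
  obtain ⟨t, p, s⟩ := x
  have hget : (groupD l).get? t =
      if t ∈ PySem.List.dedup (l.map (fun x => x.1)) then some (innerD l t) else none :=
    get?_mk_map _ (innerD l) t
  unfold stepT upsert_result_into_ci_map
  dsimp only
  rw [hget]
  by_cases ht : t ∈ PySem.List.dedup (l.map (fun x => x.1))
  · rw [if_pos ht]
    dsimp only
    have htm : t ∈ l.map (fun x => x.1) := (PySem.List.mem_dedup _ _).1 ht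
    have hinget : (innerD l t).get? p =
        if p ∈ playsOf l t then some (serialsOf l t p) else none :=
      get?_mk_map _ (fun play => serialsOf l t play) p
    rw [hinget]
    by_cases hp : p ∈ playsOf l t
    · rw [if_pos hp]
      dsimp only
      rw [show (innerD l t : PySem.Dict String (List String)) =
            PySem.Dict.mk ((playsOf l t).map (fun k => (k, serialsOf l t k))) from rfl,
          insert_mk_map, if_pos hp,
          show (groupD l : PySem.Dict String (PySem.Dict String (List String))) =
            PySem.Dict.mk ((PySem.List.dedup (l.map (fun x => x.1))).map
              (fun k => (k, innerD l k))) from rfl,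
          insert_mk_map, if_pos ht]
      unfold groupD
      rw [teams_append, if_pos ht]
      congr 1
      refine List.map_congr_left (fun team hteam => ?_)
      by_cases hteq : team = t
      · subst hteq
        unfold innerD
        rw [innerG_append_self_mem l team p s hp]
        simp
      · simp only [if_neg hteq]
        unfold innerD
        rw [innerG_append_ne l t p s team (fun h => hteq h.symm)]
    · rw [if_neg hp]
      dsimp only
      rw [show (innerD l t : PySem.Dict String (List String)) =
            PySem.Dict.mk ((playsOf l t).map (fun k => (k, serialsOf l t k))) from rfl,
          insert_mk_map, if_neg hp,
          show (groupD l : PySem.Dict String (PySem.Dict String (List String))) =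
            PySem.Dict.mk ((PySem.List.dedup (l.map (fun x => x.1))).map
              (fun k => (k, innerD l k))) from rfl,
          insert_mk_map, if_pos ht]
      unfold groupD
      rw [teams_append, if_pos ht]
      congr 1
      refine List.map_congr_left (fun team hteam => ?_)
      by_cases hteq : team = t
      · subst hteq
        unfold innerD
        rw [innerG_append_self_not_mem l team p s hp]
        simp [innerG]
      · simp only [if_neg hteq]
        unfold innerD
        rw [innerG_append_ne l t p s team (fun h => hteq h.symm)]
  · rw [if_neg ht]
    dsimp only
    have htm : t ∉ l.map (fun x => x.1) := fun h => ht ((PySem.List.mem_dedup _ _).2 h)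
    rw [show (groupD l : PySem.Dict String (PySem.Dict String (List String))) =
          PySem.Dict.mk ((PySem.List.dedup (l.map (fun x => x.1))).map
            (fun k => (k, innerD l k))) from rfl,
        insert_mk_map, if_neg ht]
    unfold groupD
    rw [teams_append, if_neg ht]
    congr 1
    rw [List.map_append]
    congr 1
    · refine List.map_congr_left (fun team hteam => ?_)
      have : t ≠ team := fun h => ht (h ▸ hteam)
      unfold innerD
      rw [innerG_append_ne l t p s team this]
    · simp [innerD_append_nil_teams l t p s htm]

lemma build_eq (l : List (String × String × String)) :
    l.foldl stepT (PySem.Dict.mk []) = groupD l := by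
  induction l using List.reverseRecOn with
  | nil => rfl
  | append_singleton l x ih => rw [List.foldl_append, List.foldl_cons, List.foldl_nil, ih, step_groupD]

lemma ports_agree (header_map : List (String × Int)) (results : List (List String)) :
    construct_serial_map header_map results = construct_serial_map_alt header_map results := by
  unfold construct_serial_map construct_serial_map_alt
  cases h1 : (PySem.Dict.mk header_map).get? "Serial" with
  | none =>
    cases (PySem.Dict.mk header_map).get? "Vuln_Play_Name" <;>
      cases (PySem.Dict.mk header_map).get? "Svc_Team" <;> rfl
  | some serial_idx =>
  cases h2 : (PySem.Dict.mk header_map).get? "Vuln_Play_Name" with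
  | none => cases (PySem.Dict.mk header_map).get? "Svc_Team" <;> rfl
  | some vuln_play_idx =>
  cases h3 : (PySem.Dict.mk header_map).get? "Svc_Team" with
  | none => rfl
  | some service_team_idx =>
  dsimp only
  suffices h : results.foldl (fun ci_map result =>
      match PySem.List.pyGet? result serial_idx, PySem.List.pyGet? result vuln_play_idx,
            PySem.List.pyGet? result service_team_idx with
      | some serial_number, some vuln_play, some service_team =>
          upsert_result_into_ci_map ci_map serial_number vuln_play service_team
      | _, _, _ => ci_map) (PySem.Dict.mk []) =
      groupD (results.filterMap (fun r =>
        (PySem.List.pyGet? r service_team_idx).bind (fun t =>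
          (PySem.List.pyGet? r vuln_play_idx).bind (fun p =>
            (PySem.List.pyGet? r serial_idx).map (fun s => (t, p, s)))))) by
    rw [h]
    simp [groupD, innerD, innerG, playsOf, serialsOf, List.map_map, Function.comp_def]
  have key : ∀ (res : List (List String)) (d : PySem.Dict String (PySem.Dict String (List String))),
      res.foldl (fun ci_map result =>
        match PySem.List.pyGet? result serial_idx, PySem.List.pyGet? result vuln_play_idx,
              PySem.List.pyGet? result service_team_idx with
        | some serial_number, some vuln_play, some service_team =>
            upsert_result_into_ci_map ci_map serial_number vuln_play service_team
        | _, _, _ => ci_map) d =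
      (res.filterMap (fun r =>
        (PySem.List.pyGet? r service_team_idx).bind (fun t =>
          (PySem.List.pyGet? r vuln_play_idx).bind (fun p =>
            (PySem.List.pyGet? r serial_idx).map (fun s => (t, p, s)))))).foldl stepT d := by
    intro res
    induction res with
    | nil => intro d; rfl
    | cons r rs ih =>
      intro d
      simp only [List.foldl_cons, List.filterMap_cons]
      cases PySem.List.pyGet? r serial_idx <;> cases PySem.List.pyGet? r vuln_play_idx <;>
        cases PySem.List.pyGet? r service_team_idx <;> dsimp only [Option.bind, Option.map] <;>
        exact ih _
  rw [key results (PySem.Dict.mk []), build_eq]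

-- ===== VERDICT (by name: the statement is the Claim_ definition above) =====
theorem construct_serial_map_spec : Claim_equal_construct_serial_map := by
  intro header_map results _ _
  exact ports_agree header_map results
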